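-- pv_equiv track=rewrite | github.com/ucgmsim/nzgd | nzgd/extract/cpt/tasks.py | find_missing_cols_for_best_sheet
-- ===== SOURCE A (Python) =====
-- def find_missing_cols_for_best_sheet(missing_columns_per_sheet: list[list]) -> list:
--     """Find the sheet with the fewest missing columns.
--
--     Parameters
--     ----------
--     missing_columns_per_sheet : list[list]
--         A list of lists, where each inner list contains the missing columns for a sheet.
--
--     Returns
--     -------
--     list
--         The list of missing columns for the sheet with the fewest missing columns.
--
--     """
--     final_num_missing_cols = 5
--     final_missing_cols = []
--     for missing_cols in missing_columns_per_sheet: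
--         if len(missing_cols) < final_num_missing_cols:
--             final_num_missing_cols = len(missing_cols)
--             final_missing_cols = missing_cols
--     return final_missing_cols
-- ===== SOURCE B (Python) =====
-- def find_missing_cols_for_best_sheet(missing_columns_per_sheet: list[list]) -> list:
--     """Rank the sheets by how many columns they miss (stable sort), then take the
--     top-ranked sheet if it misses fewer than 5 columns, else no sheet qualifies."""
--     ranked = sorted(missing_columns_per_sheet, key=len)
--     if ranked and len(ranked[0]) < 5:
--         return ranked[0]
--     return []
-- ===== Notes on version B (the rewrite author's own statement) =====
-- stated objective: alternative
-- what changed: Replaces A's threshold-plus-running-best accumulator loop with a sort-then-select: stable-sort all sheets by their number of missing columns and take the top-ranked one if it is under the threshold (stability reproduces A's first-shortest tie-breaking).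
import Mathlib
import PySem

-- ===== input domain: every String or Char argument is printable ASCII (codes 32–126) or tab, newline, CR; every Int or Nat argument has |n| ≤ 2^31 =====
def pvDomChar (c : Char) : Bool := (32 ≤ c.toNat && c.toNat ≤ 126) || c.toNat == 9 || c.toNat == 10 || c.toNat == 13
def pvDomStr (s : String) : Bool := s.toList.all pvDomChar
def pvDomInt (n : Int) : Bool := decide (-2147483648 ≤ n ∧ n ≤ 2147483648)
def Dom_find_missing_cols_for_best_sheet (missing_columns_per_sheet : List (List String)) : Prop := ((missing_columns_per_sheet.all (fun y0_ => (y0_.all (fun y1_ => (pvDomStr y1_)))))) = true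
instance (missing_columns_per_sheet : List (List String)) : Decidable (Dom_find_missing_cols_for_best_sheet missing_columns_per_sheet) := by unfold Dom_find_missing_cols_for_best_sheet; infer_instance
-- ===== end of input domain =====

-- ===== PORT A =====
-- B ranks the sheets with a stable sort by length and takes the top one under the threshold; alternative decomposition, same result.
def find_missing_cols_for_best_sheet (missing_columns_per_sheet : List (List String)) : List String :=
  (missing_columns_per_sheet.foldl
    (fun (st : Nat × List String) missing_cols =>
      if missing_cols.length < st.1 then (missing_cols.length, missing_cols) else st)
    (5, [])).2

-- ===== PORT B =====
def find_missing_cols_for_best_sheet_alt (missing_columns_per_sheet : List (List String)) : List String :=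
  let ranked := PySem.List.sorted missing_columns_per_sheet (fun c => c.length)
  match ranked with
  | [] => []
  | m :: _ => if m.length < 5 then m else []

-- ===== PRECONDITION & SPEC =====
def Spec_find_missing_cols_for_best_sheet (missing_columns_per_sheet : List (List String)) (out : List String) : Prop := out = find_missing_cols_for_best_sheet_alt missing_columns_per_sheet
instance (missing_columns_per_sheet : List (List String)) (out : List String) : Decidable (Spec_find_missing_cols_for_best_sheet missing_columns_per_sheet out) := by unfold Spec_find_missing_cols_for_best_sheet; infer_instance

-- ===== CLAIM =====
def Claim_equal_find_missing_cols_for_best_sheet : Prop := ∀ (missing_columns_per_sheet : List (List String)), Dom_find_missing_cols_for_best_sheet missing_columns_per_sheet → Spec_find_missing_cols_for_best_sheet missing_columns_per_sheet (find_missing_cols_for_best_sheet missing_columns_per_sheet)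

-- ===== LEMMAS AND PROOFS =====

-- A's loop step
def pvStepA (st : Nat × List String) (x : List String) : Nat × List String :=
  if x.length < st.1 then (x.length, x) else st

-- running "first strict min" over an option accumulator: describes the head of the insertion sort
def pvStepH (o : Option (List String)) (x : List String) : Option (List String) :=
  match o with
  | none => some x
  | some h => if x.length < h.length then some x else some h

-- view an option-head as A's loop state
def pvToA (o : Option (List String)) : Nat × List String :=
  match o with
  | none => (5, [])
  | some h => if h.length < 5 then (h.length, h) else (5, [])

theorem pv_head_insertBy (x : List String) (ys : List (List String)) :
    (PySem.List.insertBy (fun a b => decide (a.length < b.length)) x ys).head?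
      = pvStepH ys.head? x := by
  cases ys with
  | nil => rfl
  | cons h t =>
    simp only [PySem.List.insertBy, pvStepH, Option.some.injEq]
    split_ifs with h1 h2 h3 <;> simp_all

theorem pv_head_foldl_insertBy (xs : List (List String)) :
    ∀ (acc : List (List String)),
      (xs.foldl (fun acc x => PySem.List.insertBy (fun a b => decide (a.length < b.length)) x acc) acc).head?
        = xs.foldl pvStepH acc.head? := by
  induction xs with
  | nil => intro acc; rfl
  | cons x xs ih =>
    intro acc
    simp only [List.foldl_cons, ih, pv_head_insertBy]

theorem pv_stepA_toA (o : Option (List String)) (x : List String) :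
    pvStepA (pvToA o) x = pvToA (pvStepH o x) := by
  cases o <;> simp only [pvToA, pvStepA, pvStepH] <;> split_ifs <;>
    first | rfl | (exfalso; omega) | (intro h5; exfalso; omega) | (simp_all; intro h5; exfalso; omega) | simp_all

theorem pv_foldA_toA (xs : List (List String)) :
    ∀ (o : Option (List String)),
      xs.foldl pvStepA (pvToA o) = pvToA (xs.foldl pvStepH o) := by
  induction xs with
  | nil => intro o; rfl
  | cons x xs ih =>
    intro o
    simp only [List.foldl_cons, pv_stepA_toA, ih]

-- ===== VERDICT =====
theorem find_missing_cols_for_best_sheet_spec : Claim_equal_find_missing_cols_for_best_sheet := by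
  intro xs _
  unfold Spec_find_missing_cols_for_best_sheet
  have hA : find_missing_cols_for_best_sheet xs = (pvToA (xs.foldl pvStepH none)).2 := by
    have h0 : (fun (st : Nat × List String) missing_cols =>
        if missing_cols.length < st.1 then (missing_cols.length, missing_cols) else st) = pvStepA := rfl
    simp only [find_missing_cols_for_best_sheet, h0]
    rw [show ((5, []) : Nat × List String) = pvToA none from rfl, pv_foldA_toA]
  have hB : (PySem.List.sorted xs (fun c => c.length)).head? = xs.foldl pvStepH none := by
    rw [PySem.List.sorted_eq_foldl_insertBy]
    exact pv_head_foldl_insertBy xs []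
  rw [hA]
  unfold find_missing_cols_for_best_sheet_alt
  cases hs : PySem.List.sorted xs (fun c => c.length) with
  | nil =>
    rw [hs] at hB; simp at hB; rw [← hB]; rfl
  | cons m t =>
    rw [hs] at hB; simp at hB; rw [← hB]
    simp only [pvToA]
    split_ifs <;> rfl
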